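-- pv_equiv track=rewrite | github.com/dhchoi/TransitionBasedParsing | Perceptron.py | getDependentsIds
-- ===== SOURCE A (Python) =====
-- def getDependentsIds(id, arcs):
--     leftDependents = []
--     rightDependents = []
--
--     for dependentId, headId in arcs.items():
--         if id == headId:
--             if int(dependentId) < int(id):
--                 leftDependents.append(dependentId)
--             else:
--                 rightDependents.append(dependentId)
--
--     return sorted(leftDependents), sorted(rightDependents)
-- ===== SOURCE B (Python) =====
-- def _insert_sorted(xs, x):
--     # insert x into sorted list xs, keeping it sorted (scan for the insertion point)
--     i = 0
--     while i < len(xs) and xs[i] < x: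
--         i += 1
--     return xs[:i] + [x] + xs[i:]
--
--
-- def getDependentsIds(id, arcs):
--     # online insertion sort: no call to sorted(); each matching dependent is
--     # inserted at its sorted position in the proper side as it is encountered
--     left = []
--     right = []
--     for dependentId, headId in arcs.items():
--         if id == headId:
--             if int(dependentId) < int(id):
--                 left = _insert_sorted(left, dependentId)
--             else:
--                 right = _insert_sorted(right, dependentId)
--     return left, right
-- ===== Notes on version B (the rewrite author's own statement) =====
-- stated objective: alternative
-- what changed: B never calls sorted(): it maintains the two result lists as sorted lists throughout, inserting each matching dependent at its position by a scan (online insertion sort), instead of A's append-then-sort of each side at the end.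
import Mathlib
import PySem

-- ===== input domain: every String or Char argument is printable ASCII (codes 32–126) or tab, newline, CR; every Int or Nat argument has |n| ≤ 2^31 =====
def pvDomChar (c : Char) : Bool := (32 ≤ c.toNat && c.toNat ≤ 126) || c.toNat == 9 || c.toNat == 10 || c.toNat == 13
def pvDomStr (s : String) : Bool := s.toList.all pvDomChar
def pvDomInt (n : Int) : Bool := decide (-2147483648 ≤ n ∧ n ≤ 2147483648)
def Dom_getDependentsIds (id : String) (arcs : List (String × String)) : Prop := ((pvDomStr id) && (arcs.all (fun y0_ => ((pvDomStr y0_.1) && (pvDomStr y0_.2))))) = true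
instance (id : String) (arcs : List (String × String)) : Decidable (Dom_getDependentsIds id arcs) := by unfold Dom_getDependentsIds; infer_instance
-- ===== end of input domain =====

-- B never calls a sort: it keeps both result lists sorted throughout, inserting each matching dependent at its position (online insertion sort); alternative decomposition to A's append-then-sort.


-- ===== PORT A =====
def getDependentsIds (id : String) (arcs : List (String × String)) : List String × List String :=
  let dep := ((PySem.Dict.ofList arcs).items).foldl
    (fun (acc : List String × List String) dh =>
      if id = dh.2 then
        if (PySem.Int.ofStr? dh.1).getD 0 < (PySem.Int.ofStr? id).getD 0 then
          (acc.1 ++ [dh.1], acc.2)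
        else
          (acc.1, acc.2 ++ [dh.1])
      else acc) ([], [])
  (PySem.List.sorted dep.1 (fun x => x) false, PySem.List.sorted dep.2 (fun x => x) false)

-- ===== PORT B =====
-- insert x into the sorted list xs at the first position whose element is not < x
-- (port of Source B's _insert_sorted: the while-loop scans the maximal prefix of elements < x)
def insertSorted (xs : List String) (x : String) : List String :=
  xs.takeWhile (fun y => y < x) ++ x :: xs.dropWhile (fun y => y < x)

-- the for-loop of Source B, as structural recursion over the items with the two sorted accumulators
def goB (id : String) : List (String × String) → List String → List String → List String × List String
  | [], left, right => (left, right)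
  | dh :: t, left, right =>
    if id = dh.2 then
      if (PySem.Int.ofStr? dh.1).getD 0 < (PySem.Int.ofStr? id).getD 0 then
        goB id t (insertSorted left dh.1) right
      else
        goB id t left (insertSorted right dh.1)
    else goB id t left right

def getDependentsIds_alt (id : String) (arcs : List (String × String)) : List String × List String :=
  goB id ((PySem.Dict.ofList arcs).items) [] []

-- ===== PRECONDITION & SPEC =====
-- Pre_ excludes exactly the inputs on which Python A raises ValueError: a dependent whose
-- head equals id but is not int-parsable, or (if any dependent matches) a non-int-parsable id.
def Pre_getDependentsIds (id : String) (arcs : List (String × String)) : Prop :=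
  ∀ p ∈ (PySem.Dict.ofList arcs).items, p.2 = id →
    (PySem.Int.ofStr? p.1).isSome = true ∧ (PySem.Int.ofStr? id).isSome = true
instance (id : String) (arcs : List (String × String)) : Decidable (Pre_getDependentsIds id arcs) := by unfold Pre_getDependentsIds; infer_instance
def pvWitness_getDependentsIds : String × (List (String × String)) := ("2", [("1", "2"), ("3", "2"), ("4", "9")])

def Spec_getDependentsIds (id : String) (arcs : List (String × String)) (out : List String × List String) : Prop := out = getDependentsIds_alt id arcs
instance (id : String) (arcs : List (String × String)) (out : List String × List String) : Decidable (Spec_getDependentsIds id arcs out) := by unfold Spec_getDependentsIds; infer_instance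

-- ===== CLAIM (what is proved, stated in full; the proofs are below) =====
def Claim_equal_getDependentsIds : Prop := ∀ (id : String) (arcs : List (String × String)), Dom_getDependentsIds id arcs → Pre_getDependentsIds id arcs → Spec_getDependentsIds id arcs (getDependentsIds id arcs)

-- ===== LEMMAS AND PROOFS =====

-- the two matching groups, in encounter order, as the proofs refer to them
def matchedLt (id : String) (l : List (String × String)) : List String :=
  ((l.filter (fun dh => id = dh.2)).map (·.1)).filter
    (fun d => (PySem.Int.ofStr? d).getD 0 < (PySem.Int.ofStr? id).getD 0)
def matchedGe (id : String) (l : List (String × String)) : List String :=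
  ((l.filter (fun dh => id = dh.2)).map (·.1)).filter
    (fun d => ¬ ((PySem.Int.ofStr? d).getD 0 < (PySem.Int.ofStr? id).getD 0))

-- A's loop splits the gathered (matching) dependents by the int comparison, in order.
theorem foldA_eq (id : String) (l : List (String × String)) (acc : List String × List String) :
    l.foldl
      (fun (acc : List String × List String) dh =>
        if id = dh.2 then
          if (PySem.Int.ofStr? dh.1).getD 0 < (PySem.Int.ofStr? id).getD 0 then
            (acc.1 ++ [dh.1], acc.2)
          else
            (acc.1, acc.2 ++ [dh.1])
        else acc) acc
    = (acc.1 ++ matchedLt id l, acc.2 ++ matchedGe id l) := by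
  induction l generalizing acc with
  | nil => simp [matchedLt, matchedGe]
  | cons dh t ih =>
    simp only [List.foldl_cons, matchedLt, matchedGe] at *
    by_cases h1 : id = dh.2
    · rw [if_pos h1, List.filter_cons_of_pos (by simp [h1]), List.map_cons]
      by_cases h3 : (PySem.Int.ofStr? dh.1).getD 0 < (PySem.Int.ofStr? id).getD 0
      · rw [if_pos h3, ih, List.filter_cons_of_pos (by simpa using h3),
          List.filter_cons_of_neg (by simpa using h3)]
        simp
      · rw [if_neg h3, ih, List.filter_cons_of_neg (by simpa using h3),
          List.filter_cons_of_pos (by simpa using h3)]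
        simp
    · rw [if_neg h1, List.filter_cons_of_neg (by simpa using h1), ih]

-- the scan-based insertion is the standard ordered insertion
theorem insertSorted_eq_orderedInsert (xs : List String) (x : String) :
    insertSorted xs x = List.orderedInsert (· ≤ ·) x xs := by
  induction xs with
  | nil => rfl
  | cons y t ih =>
    rw [insertSorted] at ih
    simp only [insertSorted, List.takeWhile_cons, List.dropWhile_cons, List.orderedInsert]
    by_cases h : y < x
    · rw [if_pos (by simpa using h), if_pos (by simpa using h), if_neg (not_le.mpr h)]
      simp only [List.cons_append]
      exact congrArg _ ih
    · rw [if_neg (by simpa using h), if_neg (by simpa using h), if_pos (not_lt.mp h)]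
      simp

theorem foldl_insert_perm (L : List String) (acc : List String) :
    (L.foldl insertSorted acc).Perm (acc ++ L) := by
  induction L generalizing acc with
  | nil => simp
  | cons x t ih =>
    simp only [List.foldl_cons]
    refine (ih (insertSorted acc x)).trans ?_
    have h1 : (insertSorted acc x).Perm (x :: acc) := by
      rw [insertSorted_eq_orderedInsert]; exact List.perm_orderedInsert _ _ _
    exact ((h1.append_right t).trans (List.perm_middle.symm)).trans (by simp)

theorem foldl_insert_sorted (L : List String) (acc : List String)
    (h : acc.Pairwise (· ≤ ·)) : (L.foldl insertSorted acc).Pairwise (· ≤ ·) := by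
  induction L generalizing acc with
  | nil => exact h
  | cons x t ih =>
    simp only [List.foldl_cons]
    refine ih _ ?_
    rw [insertSorted_eq_orderedInsert]
    exact List.Pairwise.orderedInsert x acc h

-- for a Nodup list, the insertion-sort result IS Python's sorted()
theorem foldl_insert_eq_sorted (L : List String) (hnd : L.Nodup) :
    PySem.List.sorted L (fun x => x) false = L.foldl insertSorted [] := by
  apply PySem.List.sorted_eq_of_perm_of_pairwise_lt
  · simpa using foldl_insert_perm L []
  · have hs : (L.foldl insertSorted []).Pairwise (· ≤ ·) :=
      foldl_insert_sorted L [] (by simp)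
    have hnd' : (L.foldl insertSorted []).Nodup :=
      ((foldl_insert_perm L []).nodup_iff).mpr (by simpa using hnd)
    refine List.Pairwise.imp_of_mem ?_ (hs.and hnd')
    intro a b _ _ hab
    exact lt_of_le_of_ne hab.1 hab.2

-- B's loop inserts each group, in encounter order, into its accumulator
theorem goB_eq (id : String) (l : List (String × String)) (left right : List String) :
    goB id l left right
      = ((matchedLt id l).foldl insertSorted left, (matchedGe id l).foldl insertSorted right) := by
  induction l generalizing left right with
  | nil => simp [goB, matchedLt, matchedGe]
  | cons dh t ih =>
    simp only [goB, matchedLt, matchedGe] at *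
    by_cases h1 : id = dh.2
    · rw [if_pos h1, List.filter_cons_of_pos (by simp [h1]), List.map_cons]
      by_cases h3 : (PySem.Int.ofStr? dh.1).getD 0 < (PySem.Int.ofStr? id).getD 0
      · rw [if_pos h3, List.filter_cons_of_pos (by simpa using h3),
          List.filter_cons_of_neg (by simpa using h3)]
        simpa using ih (insertSorted left dh.1) right
      · rw [if_neg h3, List.filter_cons_of_neg (by simpa using h3),
          List.filter_cons_of_pos (by simpa using h3)]
        simpa using ih left (insertSorted right dh.1)
    · rw [if_neg h1, List.filter_cons_of_neg (by simpa using h1), ih]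

-- The gathered dependents are distinct (dict keys are unique).
theorem gathered_nodup (id : String) (arcs : List (String × String)) :
    ((((PySem.Dict.ofList arcs).items).filter (fun dh => id = dh.2)).map (·.1)).Nodup := by
  have hk : ((PySem.Dict.ofList arcs).keys).Nodup := PySem.Dict.nodup_keys_ofList arcs
  have hk' : (((PySem.Dict.ofList arcs).items).map (·.1)).Nodup := hk
  have hsub : (((PySem.Dict.ofList arcs).items).filter (fun dh => id = dh.2)).Sublist
      ((PySem.Dict.ofList arcs).items) := List.filter_sublist
  exact hk'.sublist (hsub.map (·.1))

-- ===== VERDICT (by name: the statement is the Claim_ definition above) =====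
theorem getDependentsIds_spec : Claim_equal_getDependentsIds := by
  intro id arcs _ _
  unfold Spec_getDependentsIds getDependentsIds getDependentsIds_alt
  rw [foldA_eq, goB_eq]
  have hnd := gathered_nodup id arcs
  have h1 : (matchedLt id ((PySem.Dict.ofList arcs).items)).Nodup := hnd.filter _
  have h2 : (matchedGe id ((PySem.Dict.ofList arcs).items)).Nodup := hnd.filter _
  simp only [List.nil_append]
  rw [foldl_insert_eq_sorted _ h1, foldl_insert_eq_sorted _ h2]
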